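-- pv_equiv track=rewrite | github.com/Flickinny11/static-news | core/sponsor_system.py | _butcher_talking_points
-- ===== SOURCE A (Python) =====
-- from typing import Dict, List, Optional, Tuple
--
-- def _butcher_talking_points(points: List[str], anchor: str) -> List[str]:
--     """Hilariously misinterpret the talking points"""
--     butchered = []
--
--     for point in points:
--         if anchor == 'Ray':
--             # Ray gets facts completely wrong
--             if 'encryption' in point.lower():
--                 butchered.append("They use military-grade... en-crypt-ification? That's communism!")
--             elif 'servers' in point.lower():
--                 butchered.append("They got 5000 servants! Wait, servers? What's a server?")
--             elif 'money back' in point.lower():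
--                 butchered.append("30-day monkey back guarantee! Get your monkey back!")
--             else:
--                 butchered.append(f"{point}... but I don't trust it!")
--
--         elif anchor == 'Bee':
--             # Bee makes everything about privilege
--             if 'easy' in point.lower():
--                 butchered.append("It's SO easy, which is problematic for people who like difficult things!")
--             elif 'free' in point.lower():
--                 butchered.append("They say 'free' but nothing is free under capitalism!")
--             elif 'save' in point.lower():
--                 butchered.append("Save money? Must be nice to HAVE money! Check your privilege!")
--             else:
--                 butchered.append(f"{point}... but I need to unpack this...")
--
--         else:  # Switz
--             # Switz relates everything to Canada/gravy
--             butchered.append(f"{point}, which in Canada we measure in litres per hockey stick!")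
--
--     return butchered
-- ===== SOURCE B (Python) =====
-- # Different decomposition: dispatch on the anchor ONCE (not per point), then map a
-- # single per-point function over the list; non-Ray/Bee anchors short-circuit to one
-- # comprehension with no matching at all; rule lookup is a recursive first-match.
--
-- def _first_match(rules, low):
--     if not rules:
--         return None
--     kw, repl = rules[0]
--     return repl if kw in low else _first_match(rules[1:], low)
--
--
-- def _butcher_talking_points(points, anchor):
--     if anchor == 'Ray':
--         rules = [
--             ('encryption', "They use military-grade... en-crypt-ification? That's communism!"),
--             ('servers', "They got 5000 servants! Wait, servers? What's a server?"),
--             ('money back', "30-day monkey back guarantee! Get your monkey back!"),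
--         ]
--         default = "... but I don't trust it!"
--     elif anchor == 'Bee':
--         rules = [
--             ('easy', "It's SO easy, which is problematic for people who like difficult things!"),
--             ('free', "They say 'free' but nothing is free under capitalism!"),
--             ('save', "Save money? Must be nice to HAVE money! Check your privilege!"),
--         ]
--         default = "... but I need to unpack this..."
--     else:
--         return [p + ", which in Canada we measure in litres per hockey stick!" for p in points]
--
--     def butcher(p):
--         hit = _first_match(rules, p.lower())
--         return hit if hit is not None else p + default
--
--     return list(map(butcher, points))
-- ===== Notes on version B (the rewrite author's own statement) =====
-- stated objective: alternative
-- what changed: Hoists the anchor dispatch out of the loop (A re-tests the anchor on every element): B picks the rule set once, maps one per-point function over the list with a recursive first-match over the rules, and returns a plain comprehension with no matching for non-Ray/Bee anchors.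
import Mathlib
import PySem

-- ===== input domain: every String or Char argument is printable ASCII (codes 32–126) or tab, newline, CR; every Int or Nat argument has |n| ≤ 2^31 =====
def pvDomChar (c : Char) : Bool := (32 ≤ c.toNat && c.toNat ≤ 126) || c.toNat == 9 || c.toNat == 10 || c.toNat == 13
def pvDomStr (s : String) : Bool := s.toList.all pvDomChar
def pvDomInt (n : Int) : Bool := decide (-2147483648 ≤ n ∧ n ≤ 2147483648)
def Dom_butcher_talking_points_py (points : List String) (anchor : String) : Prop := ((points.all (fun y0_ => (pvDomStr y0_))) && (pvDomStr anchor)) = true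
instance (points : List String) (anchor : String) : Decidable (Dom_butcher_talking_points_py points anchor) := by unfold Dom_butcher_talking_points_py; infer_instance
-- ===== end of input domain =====

-- B hoists the anchor dispatch out of the loop and maps one per-point function
-- (recursive first-match over a rules list) over the points (objective: alternative).

-- ===== PORT A =====
def butcher_talking_points_py (points : List String) (anchor : String) : List String :=
  points.foldl (fun butchered point =>
    if anchor == "Ray" then
      if PySem.Str.isIn "encryption" (PySem.Str.lower point) then
        butchered ++ ["They use military-grade... en-crypt-ification? That's communism!"]
      else if PySem.Str.isIn "servers" (PySem.Str.lower point) then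
        butchered ++ ["They got 5000 servants! Wait, servers? What's a server?"]
      else if PySem.Str.isIn "money back" (PySem.Str.lower point) then
        butchered ++ ["30-day monkey back guarantee! Get your monkey back!"]
      else
        butchered ++ [point ++ "... but I don't trust it!"]
    else if anchor == "Bee" then
      if PySem.Str.isIn "easy" (PySem.Str.lower point) then
        butchered ++ ["It's SO easy, which is problematic for people who like difficult things!"]
      else if PySem.Str.isIn "free" (PySem.Str.lower point) then
        butchered ++ ["They say 'free' but nothing is free under capitalism!"]
      else if PySem.Str.isIn "save" (PySem.Str.lower point) then
        butchered ++ ["Save money? Must be nice to HAVE money! Check your privilege!"]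
      else
        butchered ++ [point ++ "... but I need to unpack this..."]
    else
      butchered ++ [point ++ ", which in Canada we measure in litres per hockey stick!"]) []

-- ===== PORT B =====
-- recursive first-match over the rules list (Source B's _first_match)
def pvFirstMatch : List (String × String) → String → Option String
  | [], _ => none
  | (kw, repl) :: rest, low =>
      if PySem.Str.isIn kw low then some repl else pvFirstMatch rest low

def pvRayRules : List (String × String) :=
  [("encryption", "They use military-grade... en-crypt-ification? That's communism!"),
   ("servers", "They got 5000 servants! Wait, servers? What's a server?"),
   ("money back", "30-day monkey back guarantee! Get your monkey back!")]

def pvBeeRules : List (String × String) :=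
  [("easy", "It's SO easy, which is problematic for people who like difficult things!"),
   ("free", "They say 'free' but nothing is free under capitalism!"),
   ("save", "Save money? Must be nice to HAVE money! Check your privilege!")]

def pvButcher (rules : List (String × String)) (default : String) (p : String) : String :=
  match pvFirstMatch rules (PySem.Str.lower p) with
  | some hit => hit
  | none => p ++ default

def butcher_talking_points_py_alt (points : List String) (anchor : String) : List String :=
  if anchor == "Ray" then
    points.map (pvButcher pvRayRules "... but I don't trust it!")
  else if anchor == "Bee" then
    points.map (pvButcher pvBeeRules "... but I need to unpack this...")
  else
    points.map (fun p => p ++ ", which in Canada we measure in litres per hockey stick!")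

-- ===== PRECONDITION & SPEC =====
def Spec_butcher_talking_points_py (points : List String) (anchor : String) (out : List String) : Prop := out = butcher_talking_points_py_alt points anchor
instance (points : List String) (anchor : String) (out : List String) : Decidable (Spec_butcher_talking_points_py points anchor out) := by unfold Spec_butcher_talking_points_py; infer_instance

-- ===== CLAIM (what is proved, stated in full; the proofs are below) =====
def Claim_equal_butcher_talking_points_py : Prop := ∀ (points : List String) (anchor : String), Dom_butcher_talking_points_py points anchor → Spec_butcher_talking_points_py points anchor (butcher_talking_points_py points anchor)

-- ===== LEMMAS AND PROOFS =====

-- the string A's loop body appends for one point, factored out of the accumulator append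
def pvStepStr (anchor point : String) : String :=
  if anchor == "Ray" then
    if PySem.Str.isIn "encryption" (PySem.Str.lower point) then
      "They use military-grade... en-crypt-ification? That's communism!"
    else if PySem.Str.isIn "servers" (PySem.Str.lower point) then
      "They got 5000 servants! Wait, servers? What's a server?"
    else if PySem.Str.isIn "money back" (PySem.Str.lower point) then
      "30-day monkey back guarantee! Get your monkey back!"
    else
      point ++ "... but I don't trust it!"
  else if anchor == "Bee" then
    if PySem.Str.isIn "easy" (PySem.Str.lower point) then
      "It's SO easy, which is problematic for people who like difficult things!"
    else if PySem.Str.isIn "free" (PySem.Str.lower point) then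
      "They say 'free' but nothing is free under capitalism!"
    else if PySem.Str.isIn "save" (PySem.Str.lower point) then
      "Save money? Must be nice to HAVE money! Check your privilege!"
    else
      point ++ "... but I need to unpack this..."
  else
    point ++ ", which in Canada we measure in litres per hockey stick!"

lemma pv_foldl_append_map {α β : Type} (g : α → β) (l : List α) (acc : List β) :
    l.foldl (fun a x => a ++ [g x]) acc = acc ++ l.map g := by
  induction l generalizing acc with
  | nil => simp
  | cons x xs ih => simp [List.foldl, ih]

lemma pv_A_as_map (points : List String) (anchor : String) :
    butcher_talking_points_py points anchor = points.map (pvStepStr anchor) := by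
  unfold butcher_talking_points_py
  have h : (fun (butchered : List String) point =>
      if anchor == "Ray" then
        if PySem.Str.isIn "encryption" (PySem.Str.lower point) then
          butchered ++ ["They use military-grade... en-crypt-ification? That's communism!"]
        else if PySem.Str.isIn "servers" (PySem.Str.lower point) then
          butchered ++ ["They got 5000 servants! Wait, servers? What's a server?"]
        else if PySem.Str.isIn "money back" (PySem.Str.lower point) then
          butchered ++ ["30-day monkey back guarantee! Get your monkey back!"]
        else
          butchered ++ [point ++ "... but I don't trust it!"]
      else if anchor == "Bee" then
        if PySem.Str.isIn "easy" (PySem.Str.lower point) then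
          butchered ++ ["It's SO easy, which is problematic for people who like difficult things!"]
        else if PySem.Str.isIn "free" (PySem.Str.lower point) then
          butchered ++ ["They say 'free' but nothing is free under capitalism!"]
        else if PySem.Str.isIn "save" (PySem.Str.lower point) then
          butchered ++ ["Save money? Must be nice to HAVE money! Check your privilege!"]
        else
          butchered ++ [point ++ "... but I need to unpack this..."]
      else
        butchered ++ [point ++ ", which in Canada we measure in litres per hockey stick!"]) =
      (fun a x => a ++ [pvStepStr anchor x]) := by
    funext a x
    unfold pvStepStr
    split_ifs <;> rfl
  rw [h, pv_foldl_append_map, List.nil_append]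


lemma pv_AB_eq (points : List String) (anchor : String) :
    butcher_talking_points_py points anchor = butcher_talking_points_py_alt points anchor := by
  rw [pv_A_as_map]
  unfold butcher_talking_points_py_alt
  by_cases hR : (anchor == "Ray") = true
  · rw [if_pos hR]
    refine List.map_congr_left (fun x _ => ?_)
    unfold pvStepStr pvButcher pvRayRules pvFirstMatch
    rw [if_pos hR]
    split_ifs <;> simp_all [pvFirstMatch]
  · rw [if_neg hR]
    by_cases hB : (anchor == "Bee") = true
    · rw [if_pos hB]
      refine List.map_congr_left (fun x _ => ?_)
      unfold pvStepStr pvButcher pvBeeRules pvFirstMatch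
      rw [if_neg hR, if_pos hB]
      split_ifs <;> simp_all [pvFirstMatch]
    · rw [if_neg hB]
      refine List.map_congr_left (fun x _ => ?_)
      unfold pvStepStr
      rw [if_neg hR, if_neg hB]

-- ===== VERDICT (by name: the statement is the Claim_ definition above) =====
theorem butcher_talking_points_py_spec : Claim_equal_butcher_talking_points_py := by
  intro points anchor _
  exact pv_AB_eq points anchor
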